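-- pv_equiv track=rewrite | github.com/tannerkrewson/bioinf-as1 | main.py | find_polya_sequence
-- ===== SOURCE A (Python) =====
-- def find_polya_sequence(sequence, stop_index):
--
--     for i in range(stop_index, stop_index + 140):
--         polya_sequence = sequence[i:i + 6]
--
--         is_polya_sequence = polya_sequence == "AATAAA" or \
--                             polya_sequence == "AAAAAA" or \
--                             polya_sequence == "TATGTA" or \
--                             polya_sequence == "TATATA" or \
--                             polya_sequence == "TACATA"
--
--         if is_polya_sequence:
--             return True
--
--     return False
-- ===== SOURCE B (Python) =====
-- MOTIFS = ("AATAAA", "AAAAAA", "TATGTA", "TATATA", "TACATA")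
--
-- def find_polya_sequence(sequence, stop_index):
--     window = sequence[max(stop_index, 0):max(stop_index + 145, 0)]
--     return any(m in window for m in MOTIFS)
-- ===== Notes on version B (the rewrite author's own statement) =====
-- stated objective: simpler
-- what changed: Replaced the 140-iteration positional slice-and-compare loop by one precomputed 145-character window and a substring-containment test per motif.
-- intended difference: For negative stop_index Python's negative slice indices make A scan six-character windows at the end of the string (wraparound) and it returns True when a motif occurs only in those wrapped windows; B clamps the scan to actual positions stop_index..stop_index+139 and returns False there, the intended value for a position-based motif scan. — e.g. on find_polya_sequence("XXXXXXAATAAAYYYYY", -150): A returns true, B returns false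
import Mathlib
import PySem

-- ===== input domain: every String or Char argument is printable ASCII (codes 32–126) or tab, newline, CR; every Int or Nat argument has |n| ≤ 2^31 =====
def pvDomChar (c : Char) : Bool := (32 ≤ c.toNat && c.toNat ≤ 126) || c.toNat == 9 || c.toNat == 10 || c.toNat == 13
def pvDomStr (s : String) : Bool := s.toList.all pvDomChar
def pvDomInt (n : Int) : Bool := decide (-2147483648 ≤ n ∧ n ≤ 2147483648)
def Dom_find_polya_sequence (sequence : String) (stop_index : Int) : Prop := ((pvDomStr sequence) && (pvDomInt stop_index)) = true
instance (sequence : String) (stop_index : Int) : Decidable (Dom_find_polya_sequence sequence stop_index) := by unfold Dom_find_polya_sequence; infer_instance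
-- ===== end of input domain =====

-- B replaces A's 140-step positional slice-compare loop by one precomputed window and a
-- substring-containment test per motif (objective: simpler).

-- ===== PORT A =====
def find_polya_sequence (sequence : String) (stop_index : Int) : Bool :=
  (PySem.List.pyRange stop_index (stop_index + 140)).any (fun i =>
    let polya_sequence := PySem.Str.slice sequence (some i) (some (i + 6))
    polya_sequence == "AATAAA" ||
    polya_sequence == "AAAAAA" ||
    polya_sequence == "TATGTA" ||
    polya_sequence == "TATATA" ||
    polya_sequence == "TACATA")

-- ===== PORT B =====
def find_polya_sequence_alt (sequence : String) (stop_index : Int) : Bool :=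
  let window := PySem.Str.slice sequence (some (max stop_index 0)) (some (max (stop_index + 145) 0))
  (["AATAAA", "AAAAAA", "TATGTA", "TATATA", "TACATA"] : List String).any
    (fun m => PySem.Str.isIn m window)

-- ===== PRECONDITION & SPEC =====
-- The five polyA motifs as character lists (shared vocabulary of D_ and the lemmas).
def pvMotifs : List (List Char) :=
  ["AATAAA".toList, "AAAAAA".toList, "TATGTA".toList, "TATATA".toList, "TACATA".toList]

-- Some motif occurs at a checked window start position ≥ 0 (the position-based reading of the scan).
def pvNormHit (sequence : String) (stop_index : Int) : Prop :=
  ∃ k ∈ List.range 140, ∃ m ∈ pvMotifs,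
    0 ≤ stop_index + k ∧ m <+: sequence.toList.drop (stop_index + k).toNat

-- Some motif occurs at an end-of-string position that A reaches only through Python's
-- negative-index slice wraparound (checked index i = stop_index + k ≤ -7 read as length + i).
def pvWrapHit (sequence : String) (stop_index : Int) : Prop :=
  ∃ k ∈ List.range 140, ∃ m ∈ pvMotifs,
    stop_index + k ≤ -7 ∧ 0 ≤ (sequence.toList.length : Int) + (stop_index + k) ∧
    m <+: sequence.toList.drop ((sequence.toList.length : Int) + (stop_index + k)).toNat

-- For negative stop_index Python's negative slice indices make A scan six-character windows at the
-- END of the string (wraparound); when a motif occurs only in those wrapped windows A returns True,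
-- while B returns False, the intended value for a scan of positions stop_index..stop_index+139.
def D_find_polya_sequence (sequence : String) (stop_index : Int) : Prop :=
  stop_index < 0 ∧ pvWrapHit sequence stop_index ∧ ¬ pvNormHit sequence stop_index
instance (sequence : String) (stop_index : Int) : Decidable (D_find_polya_sequence sequence stop_index) := by
  unfold D_find_polya_sequence pvWrapHit pvNormHit; infer_instance

def Spec_find_polya_sequence (sequence : String) (stop_index : Int) (out : Bool) : Prop :=
  ¬ D_find_polya_sequence sequence stop_index → out = find_polya_sequence_alt sequence stop_index
instance (sequence : String) (stop_index : Int) (out : Bool) : Decidable (Spec_find_polya_sequence sequence stop_index out) := by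
  unfold Spec_find_polya_sequence; infer_instance

def pvDiffWitness_find_polya_sequence : String × Int := ("XXXXXXAATAAAYYYYY", -150)
def pvDiffWitnessOut_find_polya_sequence : Bool × Bool := (true, false)

-- ===== CLAIM (what is proved, stated in full; the proofs are below) =====
def Claim_unchanged_find_polya_sequence : Prop := ∀ (sequence : String) (stop_index : Int), Dom_find_polya_sequence sequence stop_index → Spec_find_polya_sequence sequence stop_index (find_polya_sequence sequence stop_index)
def Claim_changed_find_polya_sequence : Prop := Dom_find_polya_sequence (pvDiffWitness_find_polya_sequence.1) (pvDiffWitness_find_polya_sequence.2) ∧ D_find_polya_sequence (pvDiffWitness_find_polya_sequence.1) (pvDiffWitness_find_polya_sequence.2) ∧ find_polya_sequence (pvDiffWitness_find_polya_sequence.1) (pvDiffWitness_find_polya_sequence.2) = pvDiffWitnessOut_find_polya_sequence.1 ∧ find_polya_sequence_alt (pvDiffWitness_find_polya_sequence.1) (pvDiffWitness_find_polya_sequence.2) = pvDiffWitnessOut_find_polya_sequence.2 ∧ pvDiffWitnessOut_find_polya_sequence.1 ≠ pvDiffWitnessOut_find_polya_sequence.2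
def Claim_exact_find_polya_sequence : Prop := ∀ (sequence : String) (stop_index : Int), Dom_find_polya_sequence sequence stop_index → D_find_polya_sequence sequence stop_index → find_polya_sequence sequence stop_index ≠ find_polya_sequence_alt sequence stop_index

-- ===== LEMMAS AND PROOFS =====

theorem pv_motif_len : ∀ m ∈ pvMotifs, m.length = 6 := by decide

-- What 'sequence[i:i+6] == m' means, for a six-character m, at any Int index i:
-- a normal hit at i ≥ 0, or a wraparound hit at length + i for i ≤ -7; any other i yields
-- a window of fewer than six characters.
theorem pv_slice_eq_motif_iff (L m : List Char) (i : Int) (hm : m.length = 6) :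
    (PySem.List.slice L (some i) (some (i + 6)) = m) ↔
      ((0 ≤ i ∧ m <+: L.drop i.toNat) ∨
       (i + 6 ≤ -1 ∧ 0 ≤ (L.length : Int) + i ∧ m <+: L.drop ((L.length : Int) + i).toNat)) := by
  rcases lt_or_ge i 0 with hi | hi
  · by_cases h1 : i + 6 ≤ -1
    · by_cases h2 : (L.length : Int) + i < 0
      · -- start clamped to 0, fewer than six characters: no match, and neither reading applies
        constructor
        · intro h
          have hlen := congrArg List.length h
          simp only [PySem.List.slice, PySem.List.clampIdx, List.length_take,
            List.length_drop, hm] at hlen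
          split_ifs at hlen <;> omega
        · rintro (⟨h, -⟩ | ⟨-, h, -⟩) <;> omega
      · -- genuine wrapped window of six characters at position length + i
        simp only [PySem.List.slice, PySem.List.clampIdx, if_pos hi, if_neg h2,
          if_pos (by omega : i + 6 < 0), if_neg (by omega : ¬ (L.length:Int) + (i+6) < 0)]
        have e6 : ((L.length:Int) + (i + 6)).toNat - ((L.length:Int) + i).toNat = 6 := by omega
        rw [e6]
        constructor
        · intro h
          exact Or.inr ⟨h1, by omega, List.prefix_iff_eq_take.mpr (by rw [hm, h])⟩
        · rintro (⟨h, -⟩ | ⟨-, -, hp⟩)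
          · omega
          · have := List.prefix_iff_eq_take.mp hp
            rw [hm] at this
            exact this.symm
    · -- -6 ≤ i ≤ -1: the window has fewer than six characters on every reading
      constructor
      · intro h
        have hlen := congrArg List.length h
        simp only [PySem.List.slice, PySem.List.clampIdx, List.length_take,
          List.length_drop, hm] at hlen
        split_ifs at hlen <;> omega
      · rintro (⟨h, -⟩ | ⟨h, -, -⟩) <;> omega
  · rw [PySem.List.slice_toNat L hi (by omega)]
    have e6 : (i + 6).toNat - i.toNat = 6 := by omega
    rw [e6]
    constructor
    · intro h
      exact Or.inl ⟨hi, List.prefix_iff_eq_take.mpr (by rw [hm, h])⟩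
    · rintro (⟨-, hp⟩ | ⟨h7, -, -⟩)
      · have := List.prefix_iff_eq_take.mp hp
        rw [hm] at this
        exact this.symm
      · omega

-- A returns True exactly on a wrapped hit or a normal hit.
theorem pv_A_iff (s : String) (st : Int) :
    find_polya_sequence s st = true ↔ pvWrapHit s st ∨ pvNormHit s st := by
  have h1 : find_polya_sequence s st = true ↔
      ∃ i ∈ PySem.List.pyRange st (st + 140), ∃ m ∈ pvMotifs,
        PySem.List.slice s.toList (some i) (some (i + 6)) = m := by
    simp only [find_polya_sequence, List.any_eq_true, Bool.or_eq_true, beq_iff_eq,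
      ← String.toList_inj, PySem.Str.toList_slice, PySem.Chars.slice_eq_listSlice]
    simp [pvMotifs]
    exact exists_congr fun i => by tauto
  rw [h1]
  unfold pvWrapHit pvNormHit
  constructor
  · rintro ⟨i, hi, m, hm, hsl⟩
    rw [PySem.List.mem_pyRange_one] at hi
    have hk : st + (((i - st).toNat : Nat) : Int) = i := by omega
    rcases (pv_slice_eq_motif_iff s.toList m i (pv_motif_len m hm)).mp hsl with ⟨h0, hp⟩ | ⟨h7, hn, hp⟩
    · exact Or.inr ⟨(i - st).toNat, List.mem_range.mpr (by omega), m, hm, by rw [hk]; exact h0,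
        by rw [hk]; exact hp⟩
    · exact Or.inl ⟨(i - st).toNat, List.mem_range.mpr (by omega), m, hm, by rw [hk]; omega,
        by rw [hk]; omega, by rw [hk]; exact hp⟩
  · rintro (⟨k, hk, m, hm, h7, hn, hp⟩ | ⟨k, hk, m, hm, h0, hp⟩) <;> rw [List.mem_range] at hk
    · exact ⟨st + k, PySem.List.mem_pyRange_one.mpr (by omega), m, hm,
        (pv_slice_eq_motif_iff s.toList m _ (pv_motif_len m hm)).mpr (Or.inr ⟨by omega, hn, hp⟩)⟩
    · exact ⟨st + k, PySem.List.mem_pyRange_one.mpr (by omega), m, hm,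
        (pv_slice_eq_motif_iff s.toList m _ (pv_motif_len m hm)).mpr (Or.inl ⟨h0, hp⟩)⟩

-- A six-character motif sits inside take t (drop a L) exactly when it sits at some
-- absolute position a + j with the whole window inside the taken region.
theorem pv_infix_take_iff (s : String) (m : List Char) (hm : m.length = 6) (t a : Nat) :
    m <:+: List.take t (s.toList.drop a) ↔ ∃ j : Nat, j + 6 ≤ t ∧ m <+: s.toList.drop (a + j) := by
  rw [← PySem.Chars.isIn_iff_infix, ← PySem.Chars.exists_prefix_drop_iff_isIn]
  constructor
  · rintro ⟨j, hp⟩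
    rw [List.drop_take, List.drop_drop] at hp
    have h2 := List.prefix_take_iff.mp hp
    exact ⟨j, by omega, h2.1⟩
  · rintro ⟨j, hj, hp⟩
    refine ⟨j, ?_⟩
    rw [List.drop_take, List.drop_drop]
    exact List.prefix_take_iff.mpr ⟨hp, by omega⟩

-- B returns True exactly on a normal hit.
theorem pv_B_iff (s : String) (st : Int) :
    find_polya_sequence_alt s st = true ↔ pvNormHit s st := by
  have h1 : find_polya_sequence_alt s st = true ↔
      ∃ m ∈ pvMotifs, m <:+: List.take ((max (st + 145) 0).toNat - (max st 0).toNat)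
        (s.toList.drop (max st 0).toNat) := by
    simp only [find_polya_sequence_alt, List.any_eq_true, PySem.Str.isIn_iff_infix,
      PySem.Str.toList_slice, PySem.Chars.slice_eq_listSlice,
      PySem.List.slice_toNat s.toList (le_max_right st 0) (le_max_right (st + 145) 0)]
    simp [pvMotifs]
  rw [h1]
  unfold pvNormHit
  constructor
  · rintro ⟨m, hm, hinf⟩
    obtain ⟨j, hj, hp⟩ := (pv_infix_take_iff s m (pv_motif_len m hm) _ _).mp hinf
    refine ⟨((max st 0 : Int) + j - st).toNat, List.mem_range.mpr (by omega), m, hm, by omega, ?_⟩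
    have hpos : (st + (((max st 0 : Int) + j - st).toNat : Int)).toNat = (max st 0).toNat + j := by omega
    rw [hpos]; exact hp
  · rintro ⟨k, hk, m, hm, h0, hp⟩
    rw [List.mem_range] at hk
    refine ⟨m, hm, (pv_infix_take_iff s m (pv_motif_len m hm) _ _).mpr
      ⟨(st + k).toNat - (max st 0).toNat, by omega, ?_⟩⟩
    have hpos : (max st 0).toNat + ((st + k).toNat - (max st 0).toNat) = (st + k).toNat := by omega
    rw [hpos]; exact hp

-- A wrapped hit forces a negative stop_index.
theorem pv_wrap_neg (sequence : String) (stop_index : Int)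
    (h : pvWrapHit sequence stop_index) : stop_index < 0 := by
  obtain ⟨k, hk, m, _, h7, -⟩ := h
  have : (0:Int) ≤ k := Int.natCast_nonneg k
  omega

-- ===== VERDICT (by name: the statement is the Claim_ definition above) =====
theorem find_polya_sequence_spec : Claim_unchanged_find_polya_sequence := by
  intro sequence stop_index _ hnD
  by_cases hN : pvNormHit sequence stop_index
  · rw [(pv_A_iff sequence stop_index).mpr (Or.inr hN), (pv_B_iff sequence stop_index).mpr hN]
  · have hB : find_polya_sequence_alt sequence stop_index = false := by
      rw [← Bool.not_eq_true, pv_B_iff]; exact hN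
    have hW : ¬ pvWrapHit sequence stop_index := by
      intro hW
      exact hnD ⟨pv_wrap_neg sequence stop_index hW, hW, hN⟩
    have hA : find_polya_sequence sequence stop_index = false := by
      rw [← Bool.not_eq_true, pv_A_iff]; rintro (h | h) <;> [exact hW h; exact hN h]
    rw [hA, hB]

set_option maxRecDepth 100000 in
theorem find_polya_sequence_changed : Claim_changed_find_polya_sequence := by
  unfold Claim_changed_find_polya_sequence; decide

theorem find_polya_sequence_tight : Claim_exact_find_polya_sequence := by
  intro sequence stop_index _ hD
  obtain ⟨-, hW, hN⟩ := hD
  rw [(pv_A_iff sequence stop_index).mpr (Or.inl hW)]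
  intro h
  exact hN ((pv_B_iff sequence stop_index).mp h.symm)
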